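-- pv_equiv track=rewrite | github.com/linhdvu14/cp-sols | sols/CodeForces/1593_d3/B_Make_it_Divisible_by_25.py | solve
-- ===== SOURCE A (Python) =====
-- targets = ['00', '50', '25', '75']
--
-- def solve(S):
-- 	res = N = len(S)
-- 	if N >= 2 and S[N-2:] in targets: return 0
-- 	for i in range(N):
-- 		for j in range(i+1, N):
-- 			if S[i] + S[j] in targets:
-- 				res = min(res, j-i-1 + N-j-1)
-- 	return res
-- ===== SOURCE B (Python) =====
-- def solve(S):
--     # One right-to-left pass: cost of keeping pair (i, j) is N-i-2 regardless of j,
--     # so the answer is N-i-2 for the largest i that can start a valid pair.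
--     N = len(S)
--     seen0 = seen5 = False
--     for i in range(N - 1, -1, -1):
--         c = S[i]
--         if (seen0 and c in '05') or (seen5 and c in '27'):
--             return N - i - 2
--         seen0 = seen0 or c == '0'
--         seen5 = seen5 or c == '5'
--     return N
-- ===== Notes on version B (the rewrite author's own statement) =====
-- stated objective: faster
-- what changed: The quadratic scan over all pairs (i,j) is replaced by a single right-to-left pass with two seen-digit flags: the deletion cost j-i-1 + N-j-1 equals N-i-2 independently of j, so the answer is N-i-2 for the largest i whose digit can start a valid pair with some later zero-digit or five-digit.
import Mathlib
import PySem

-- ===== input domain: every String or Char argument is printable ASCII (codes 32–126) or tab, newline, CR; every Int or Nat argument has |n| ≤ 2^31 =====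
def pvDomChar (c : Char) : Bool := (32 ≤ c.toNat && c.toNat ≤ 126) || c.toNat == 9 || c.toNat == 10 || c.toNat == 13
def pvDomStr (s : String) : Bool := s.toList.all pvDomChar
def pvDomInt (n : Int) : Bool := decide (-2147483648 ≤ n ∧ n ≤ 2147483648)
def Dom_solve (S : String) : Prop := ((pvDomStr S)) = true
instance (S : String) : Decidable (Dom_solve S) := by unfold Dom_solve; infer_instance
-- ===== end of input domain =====

-- B replaces A's O(N^2) pair scan by a single right-to-left pass: the deletion cost
-- N-i-2 of a valid pair (i,j) does not depend on j, so the answer is determined by the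
-- largest i that can start a valid pair. Objective: faster (asymptotic, O(N^2) → O(N)).

-- ===== PORT A =====
def targets : List String := ["00", "50", "25", "75"]

def solve (S : String) : Int :=
  let l := S.toList
  let N : Int := PySem.Str.len S
  -- if N >= 2 and S[N-2:] in targets: return 0
  if 2 ≤ N ∧ PySem.Str.slice S (some (N - 2)) none ∈ targets then 0
  else
    -- for i in range(N): for j in range(i+1, N): …
    -- S[i], S[j]: i and j are always in range here, so Python's S[i] never raises;
    -- pyGetD with a dummy default is exact. S[i] + S[j] is the two-char string.
    (PySem.List.pyRange 0 N 1).foldl (fun res i =>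
      (PySem.List.pyRange (i + 1) N 1).foldl (fun res j =>
        if String.ofList [PySem.List.pyGetD l i ' ', PySem.List.pyGetD l j ' '] ∈ targets then
          min res (j - i - 1 + (N - j - 1))
        else res) res) N

-- ===== PORT B =====
-- the loop 'for i in range(N-1, -1, -1)' with an early return: fuel n+1 processes index n,
-- counting down; 'some i' models 'return N-i-2' (the subtraction is done by the caller).
def solveAltGo (l : List Char) (seen0 seen5 : Bool) : Nat → Option Nat
  | 0 => none
  | n + 1 =>
    let c := l.getD n ' '
    -- (seen0 and c in '05') or (seen5 and c in '27')
    if (seen0 && (c == '0' || c == '5')) || (seen5 && (c == '2' || c == '7')) then some n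
    else solveAltGo l (seen0 || c == '0') (seen5 || c == '5') n

def solve_alt (S : String) : Int :=
  let l := S.toList
  match solveAltGo l false false l.length with
  | some i => (l.length : Int) - i - 2
  | none => (l.length : Int)

-- ===== PRECONDITION & SPEC =====
def Spec_solve (S : String) (out : Int) : Prop := out = solve_alt S
instance (S : String) (out : Int) : Decidable (Spec_solve S out) := by unfold Spec_solve; infer_instance

-- ===== CLAIM (what is proved, stated in full; the proofs are below) =====
def Claim_equal_solve : Prop := ∀ (S : String), Dom_solve S → Spec_solve S (solve S)

-- ===== LEMMAS AND PROOFS =====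

-- the condition B tests at index n (seen-flags expressed as containment in the tail)
def validB (l : List Char) (n : Nat) : Bool :=
  let c := l.getD n ' '
  (((l.drop (n + 1)).contains '0') && (c == '0' || c == '5')) ||
  (((l.drop (n + 1)).contains '5') && (c == '2' || c == '7'))

-- largest index i < n with validB l i, as an Option
def mv (l : List Char) : Nat → Option Nat
  | 0 => none
  | n + 1 => if validB l n then some n else mv l n

theorem mv_lt (l : List Char) : ∀ n i, mv l n = some i → i < n := by
  intro n
  induction n with
  | zero => intro i h; simp [mv] at h
  | succ n ih =>
    intro i h
    by_cases hv : validB l n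
    · simp [mv, hv] at h; omega
    · simp [mv, hv] at h; have := ih i h; omega

theorem targets_mem_iff (a b : Char) :
    (String.ofList [a, b] ∈ targets) ↔
      ((b = '0' ∧ (a = '0' ∨ a = '5')) ∨ (b = '5' ∧ (a = '2' ∨ a = '7'))) := by
  constructor
  · intro h
    simp only [targets, List.mem_cons, List.not_mem_nil, or_false] at h
    rcases h with h | h | h | h <;>
    · have := congrArg String.toList h
      rw [String.toList_ofList] at this
      simp at this
      simp [this]
  · rintro (⟨rfl, rfl | rfl⟩ | ⟨rfl, rfl | rfl⟩) <;> simp [targets]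

theorem mem_drop_iff (l : List Char) (m : Nat) (b : Char) :
    b ∈ l.drop m ↔ ∃ j : Nat, m ≤ j ∧ j < l.length ∧ l.getD j ' ' = b := by
  rw [List.mem_iff_getElem]
  constructor
  · rintro ⟨k, hk, hget⟩
    refine ⟨m + k, by omega, by simp at hk; omega, ?_⟩
    rw [List.getElem_drop] at hget
    rw [List.getD_eq_getElem l ' ' (by simp at hk; omega)]
    exact hget
  · rintro ⟨j, hmj, hj, hget⟩
    refine ⟨j - m, by simp; omega, ?_⟩
    rw [List.getElem_drop]
    rw [List.getD_eq_getElem l ' ' hj] at hget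
    simpa [Nat.add_sub_cancel' hmj] using hget

-- B's flag condition at index n, as an existence statement over later indices
theorem validB_true_iff (l : List Char) (n : Nat) :
    validB l n = true ↔ ∃ j : Nat, n < j ∧ j < l.length ∧
      ((l.getD j ' ' = '0' ∧ (l.getD n ' ' = '0' ∨ l.getD n ' ' = '5')) ∨
       (l.getD j ' ' = '5' ∧ (l.getD n ' ' = '2' ∨ l.getD n ' ' = '7'))) := by
  have h0 : ∀ b : Char, (l.drop (n + 1)).contains b = true ↔
      ∃ j, n < j ∧ j < l.length ∧ l.getD j ' ' = b := by
    intro b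
    rw [List.contains_iff_mem, mem_drop_iff]
    constructor
    · rintro ⟨j, h1, h2, h3⟩; exact ⟨j, by omega, h2, h3⟩
    · rintro ⟨j, h1, h2, h3⟩; exact ⟨j, by omega, h2, h3⟩
  simp only [validB, Bool.or_eq_true, Bool.and_eq_true, beq_iff_eq, h0]
  constructor
  · rintro (⟨⟨j, h1, h2, h3⟩, hc⟩ | ⟨⟨j, h1, h2, h3⟩, hc⟩)
    · exact ⟨j, h1, h2, Or.inl ⟨h3, hc⟩⟩
    · exact ⟨j, h1, h2, Or.inr ⟨h3, hc⟩⟩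
  · rintro ⟨j, h1, h2, ⟨h3, hc⟩ | ⟨h3, hc⟩⟩
    · exact Or.inl ⟨⟨j, h1, h2, h3⟩, hc⟩
    · exact Or.inr ⟨⟨j, h1, h2, h3⟩, hc⟩

-- A's inner existence test (some j > i completes a pair) equals B's flag condition at i
theorem any_eq_validB (l : List Char) (n : Nat) :
    ((PySem.List.pyRange ((n : Int) + 1) (l.length : Int) 1).any fun j =>
        decide (String.ofList [PySem.List.pyGetD l (n : Int) ' ', PySem.List.pyGetD l j ' '] ∈ targets))
      = validB l n := by
  rcases hb : validB l n with _ | _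
  · rw [List.any_eq_false]
    intro j hj
    rw [PySem.List.mem_pyRange_one] at hj
    obtain ⟨j', rfl⟩ : ∃ j' : Nat, j = (j' : Int) := ⟨j.toNat, by omega⟩
    simp only [PySem.List.pyGetD_natCast, decide_eq_true_eq]
    intro hmem
    rw [targets_mem_iff] at hmem
    have : validB l n = true :=
      (validB_true_iff l n).mpr ⟨j', by omega, by omega, by tauto⟩
    rw [hb] at this
    simp at this
  · rw [List.any_eq_true]
    obtain ⟨j, hjn, hj, hshape⟩ := (validB_true_iff l n).mp hb
    refine ⟨(j : Int), by rw [PySem.List.mem_pyRange_one]; omega, ?_⟩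
    simp only [PySem.List.pyGetD_natCast, decide_eq_true_eq]
    rw [targets_mem_iff]
    tauto

-- generic: fold of 'if p x then min res c else res' is an any-test
theorem foldl_min_if {α : Type} (p : α → Prop) [DecidablePred p] (c : Int) :
    ∀ (xs : List α) (res : Int),
      xs.foldl (fun r x => if p x then min r c else r) res
        = if xs.any (fun x => decide (p x)) then min res c else res := by
  intro xs
  induction xs with
  | nil => intro res; simp
  | cons x xs ih =>
    intro res
    by_cases hp : p x
    · simp [hp, ih]
    · simp [hp, ih]

-- the outer loop over i in range(0, n) computes the cost at the largest valid i below n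
theorem outer_fold (l : List Char) (n : Nat) (hn : n ≤ l.length) :
    (PySem.List.pyRange 0 (n : Int) 1).foldl
        (fun res i => if validB l i.toNat then min res ((l.length : Int) - i - 2) else res)
        (l.length : Int)
      = (match mv l n with
         | some i => (l.length : Int) - i - 2
         | none => (l.length : Int)) := by
  induction n with
  | zero =>
    rw [PySem.List.pyRange_one_eq_nil (by omega)]
    simp [mv]
  | succ n ih =>
    have hcast : ((n : Int) + 1) = ((n + 1 : Nat) : Int) := by push_cast; ring
    rw [← hcast, PySem.List.pyRange_one_succ_right (by positivity), List.foldl_append]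
    rw [ih (by omega)]
    simp only [List.foldl_cons, List.foldl_nil, Int.toNat_natCast]
    by_cases hv : validB l n
    · simp only [hv, if_true, mv]
      rcases hmv : mv l n with _ | i
      · simp
        omega
      · have hi := mv_lt l n i hmv
        simp
        omega
    · simp [mv, hv]

-- B's scan with correct flags computes mv
theorem goB_eq_mv (l : List Char) :
    ∀ n, n ≤ l.length →
      solveAltGo l ((l.drop n).contains '0') ((l.drop n).contains '5') n = mv l n := by
  intro n
  induction n with
  | zero => intro _; simp [solveAltGo, mv]
  | succ n ih =>
    intro hn
    have hdrop : l.drop n = l.getD n ' ' :: l.drop (n + 1) := by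
      rw [List.getD_eq_getElem l ' ' (by omega)]
      exact List.drop_eq_getElem_cons (by omega)
    have hc0 : (l.drop n).contains '0' = ((l.drop (n+1)).contains '0' || (l.getD n ' ' == '0')) := by
      rw [hdrop]
      simp [Bool.or_comm, Bool.beq_eq_decide_eq, eq_comm]
    have hc5 : (l.drop n).contains '5' = ((l.drop (n+1)).contains '5' || (l.getD n ' ' == '5')) := by
      rw [hdrop]
      simp [Bool.or_comm, Bool.beq_eq_decide_eq, eq_comm]
    rw [solveAltGo, mv]
    by_cases hv : validB l n
    · have : (((l.drop (n+1)).contains '0') && (l.getD n ' ' == '0' || l.getD n ' ' == '5') ||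
              ((l.drop (n+1)).contains '5') && (l.getD n ' ' == '2' || l.getD n ' ' == '7')) = true := hv
      simp only [this, if_true, hv]
    · have : (((l.drop (n+1)).contains '0') && (l.getD n ' ' == '0' || l.getD n ' ' == '5') ||
              ((l.drop (n+1)).contains '5') && (l.getD n ' ' == '2' || l.getD n ' ' == '7')) = false := by
        simpa [validB] using hv
      simp only [this, if_false, hv, Bool.false_eq_true, ← hc0, ← hc5]
      exact ih (by omega)

-- solve_alt, unfolded to the mv characterisation
theorem solve_alt_eq_mv (S : String) :
    solve_alt S = (match mv S.toList S.toList.length with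
                   | some i => (S.toList.length : Int) - i - 2
                   | none => (S.toList.length : Int)) := by
  have h := goB_eq_mv S.toList S.toList.length (le_refl _)
  simp only [List.drop_length, List.contains_nil] at h
  simp only [solve_alt, h]

-- the shortcut branch: a two-char suffix in targets makes index N-2 valid and maximal
theorem shortcut_mv (l : List Char) (m : Nat) (hl : l.length = m + 2)
    (a b : Char) (hd : l.drop m = [a, b])
    (hmem : String.ofList [a, b] ∈ targets) :
    mv l (m + 2) = some m := by
  have hdn : l.drop (m + 1) = [b] := by
    have : (l.drop m).drop 1 = [b] := by rw [hd]; rfl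
    simpa [List.drop_drop] using this
  have hdn2 : l.drop (m + 2) = [] := List.drop_eq_nil_of_le (by omega)
  have hma : l[m]? = some a := by
    have h := congrArg List.head? hd
    simp only [List.head?_drop, List.head?_cons] at h
    exact h
  have hv1 : validB l (m + 1) = false := by
    simp [validB, hdn2]
  have hv0 : validB l m = true := by
    rw [targets_mem_iff] at hmem
    rcases hmem with ⟨rfl, hab⟩ | ⟨rfl, hab⟩ <;>
      · simp [validB, hdn, List.getD_eq_getElem?_getD, hma]
        tauto
  show mv l (m + 1 + 1) = some m
  rw [mv, hv1]
  simp only [Bool.false_eq_true, if_false]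
  rw [mv, hv0]
  simp

-- ===== VERDICT (by name: the statement is the Claim_ definition above) =====
theorem solve_spec : Claim_equal_solve := by
  intro S _
  unfold Spec_solve solve
  simp only [PySem.Str.len_eq]
  split_ifs with h
  · -- shortcut: suffix of length 2 in targets; both sides are 0
    obtain ⟨h2, hmem⟩ := h
    obtain ⟨m, hm⟩ : ∃ m : Nat, S.toList.length = m + 2 := ⟨S.toList.length - 2, by omega⟩
    have hslice : (PySem.Str.slice S (some ((S.toList.length : Int) - 2)) none).toList
        = S.toList.drop m := by
      rw [PySem.Str.toList_slice]
      have : ((S.toList.length : Int) - 2) = ((m : Nat) : Int) := by omega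
      rw [this]
      simp
    have hlen2 : (S.toList.drop m).length = 2 := by
      rw [List.length_drop, hm]; omega
    obtain ⟨a, b, hd⟩ : ∃ a b, S.toList.drop m = [a, b] := by
      rcases e : S.toList.drop m with _ | ⟨a, t⟩
      · rw [e] at hlen2; simp at hlen2
      · rcases t with _ | ⟨b, t'⟩
        · rw [e] at hlen2; simp at hlen2
        · rw [e] at hlen2; simp at hlen2; exact ⟨a, b, by simp [hlen2]⟩
    have hstr : PySem.Str.slice S (some ((S.toList.length : Int) - 2)) none
        = String.ofList [a, b] := by
      have h := congrArg String.ofList (hslice.trans hd)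
      rwa [String.ofList_toList] at h
    rw [hstr] at hmem
    rw [solve_alt_eq_mv, hm, shortcut_mv S.toList m hm a b hd hmem]
    show (0 : Int) = ((m + 2 : Nat) : Int) - (m : Nat) - 2
    push_cast
    ring
  · -- no shortcut: reduce the nested fold to the mv characterisation
    rw [solve_alt_eq_mv]
    rw [← outer_fold S.toList S.toList.length (le_refl _)]
    apply PySem.List.foldl_congr_mem
    intro acc i hi
    rw [PySem.List.mem_pyRange_one] at hi
    obtain ⟨n, rfl⟩ : ∃ n : Nat, i = (n : Int) := ⟨i.toNat, by omega⟩
    have hfun : (fun (res : Int) (j : Int) =>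
        if String.ofList [PySem.List.pyGetD S.toList (n : Int) ' ', PySem.List.pyGetD S.toList j ' '] ∈ targets then
          min res (j - (n : Int) - 1 + ((S.toList.length : Int) - j - 1))
        else res)
      = (fun (res : Int) (j : Int) =>
        if String.ofList [PySem.List.pyGetD S.toList (n : Int) ' ', PySem.List.pyGetD S.toList j ' '] ∈ targets then
          min res ((S.toList.length : Int) - (n : Int) - 2)
        else res) := by
      funext res j
      by_cases hm : String.ofList [PySem.List.pyGetD S.toList (n : Int) ' ', PySem.List.pyGetD S.toList j ' '] ∈ targets
      · rw [if_pos hm, if_pos hm]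
        congr 1
        ring
      · rw [if_neg hm, if_neg hm]
    rw [hfun, foldl_min_if, any_eq_validB S.toList n]
    simp only [Int.toNat_natCast]
    rfl
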